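-- pv_equiv track=rewrite | github.com/hrenae/JPMorgan_Internship_Question_1 | Theory_based_Model/forecast_plot_pareja_baseline_v3.py | _safe_sector_name
-- ===== SOURCE A (Python) =====
-- def _safe_sector_name(s: str) -> str:
--     s = str(s).strip().lower()
--     s = s.replace("&", "and")
--     for ch in ["/", "\\", " ", "-", ":", ",", "."]:
--         s = s.replace(ch, "_")
--     while "__" in s:
--         s = s.replace("__", "_")
--     return s.strip("_")
-- ===== SOURCE B (Python) =====
-- def _safe_sector_name(s: str) -> str:
--     s = str(s).strip().lower().replace("&", "and")
--     seps = {'/', '\\', ' ', '-', ':', ',', '.', '_'}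
--     out = []
--     for c in s:
--         if c in seps:
--             if out and out[-1] == '_':
--                 continue
--             out.append('_')
--         else:
--             out.append(c)
--     return "".join(out).strip('_')
-- ===== Notes on version B (the rewrite author's own statement) =====
-- stated objective: alternative
-- what changed: Replaced the six sequential str.replace passes plus the doubled-underscore collapse while loop by a single left-to-right scan that emits an underscore for a separator character only when the previously emitted character is not already an underscore.
import Mathlib
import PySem

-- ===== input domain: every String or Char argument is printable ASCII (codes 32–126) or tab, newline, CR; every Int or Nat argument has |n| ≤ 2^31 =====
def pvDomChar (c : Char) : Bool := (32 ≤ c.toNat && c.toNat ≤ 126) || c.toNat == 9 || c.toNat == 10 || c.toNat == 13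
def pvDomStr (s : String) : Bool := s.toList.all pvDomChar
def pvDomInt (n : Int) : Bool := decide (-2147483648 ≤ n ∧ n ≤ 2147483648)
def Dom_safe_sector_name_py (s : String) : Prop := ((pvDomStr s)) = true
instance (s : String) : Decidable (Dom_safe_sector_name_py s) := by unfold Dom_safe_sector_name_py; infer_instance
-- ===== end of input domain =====

-- B replaces A's six replace passes plus the repeated double-underscore collapse loop by one scan that never emits two
-- consecutive underscores (objective: alternative single-pass decomposition; same return value).

-- ===== PORT A =====
-- A-side helper: what one CPython double-underscore-to-single replace pass computes (left-to-right, non-overlapping);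
-- used only to justify termination of the while loop below.
def repU : List Char → List Char
  | [] => []
  | [c] => [c]
  | a :: b :: t => if a = '_' ∧ b = '_' then '_' :: repU t else a :: repU (b :: t)

lemma go_pair (fuel : Nat) : ∀ (l acc : List Char), l.length ≤ fuel →
    PySem.Chars.replace.go ['_','_'] ['_'] fuel l acc = acc.reverse ++ repU l := by
  induction fuel with
  | zero => intro l acc h; cases l with
    | nil => simp [PySem.Chars.replace.go, repU]
    | cons c t => simp at h
  | succ n ih =>
    intro l acc h
    match l with
    | [] => simp [PySem.Chars.replace.go, repU]
    | [c] =>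
      rw [PySem.Chars.replace.go]
      have hpre : List.isPrefixOf ['_','_'] [c] = false := by simp [List.isPrefixOf]
      simp only [hpre, Bool.false_eq_true, if_false]
      rw [ih [] (c :: acc) (by simp)]
      simp [repU]
    | a :: b :: t =>
      rw [PySem.Chars.replace.go]
      by_cases hp : a = '_' ∧ b = '_'
      · obtain ⟨ha, hb⟩ := hp; subst ha hb
        have hpre : List.isPrefixOf ['_','_'] ('_' :: '_' :: t) = true := by
          simp [List.isPrefixOf]
        simp only [hpre, if_true, List.length_cons, List.drop_succ_cons, List.drop_zero,
          List.length_nil, List.reverse_cons, List.reverse_nil, List.nil_append,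
          List.singleton_append]
        rw [ih t ('_' :: acc) (by simp at h ⊢; omega)]
        simp [repU]
      · have hpre : List.isPrefixOf ['_','_'] (a :: b :: t) = false := by
          simp [List.isPrefixOf]; intro ha hb; exact hp ⟨ha.symm, hb.symm⟩
        simp only [hpre, Bool.false_eq_true, if_false]
        rw [ih (b :: t) (a :: acc) (by simp at h ⊢; omega)]
        simp [repU, hp]

lemma replace_pair (l : List Char) : PySem.Chars.replace l ['_','_'] ['_'] = repU l := by
  rw [PySem.Chars.replace]
  simp only [List.isEmpty_cons, Bool.false_eq_true, if_false]
  exact go_pair l.length l [] le_rfl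

lemma repU_len_le (l : List Char) : (repU l).length ≤ l.length := by
  induction l using repU.induct with
  | case1 => simp [repU]
  | case2 c => simp [repU]
  | case3 a b t h ih => simp [repU, h]; simp at ih; omega
  | case4 a b t h ih => simp [repU, h]; simpa using ih

lemma repU_len_lt (l : List Char) (h : PySem.Chars.isIn ['_','_'] l = true) :
    (repU l).length < l.length := by
  rw [PySem.Chars.isIn_iff_infix] at h
  induction l using repU.induct with
  | case1 => exact absurd h.length_le (by simp)
  | case2 c => exact absurd h.length_le (by simp)
  | case3 a b t hab ih =>
    have := repU_len_le t
    simp [repU, hab]; omega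
  | case4 a b t hab ih =>
    rcases List.infix_cons_iff.mp h with hpre | hinf
    · rcases List.cons_prefix_cons.mp hpre with ⟨ha, hpre2⟩
      rcases List.cons_prefix_cons.mp hpre2 with ⟨hb, _⟩
      exact absurd ⟨ha.symm, hb.symm⟩ hab
    · have := ih hinf
      simp [repU, hab]; simp at this; omega

-- A's underscore-collapsing while loop, literally.
def collapseLoop (l : List Char) : List Char :=
  if h : PySem.Chars.isIn ['_','_'] l = true then
    collapseLoop (PySem.Chars.replace l ['_','_'] ['_'])
  else l
termination_by l.length
decreasing_by
  rw [replace_pair]; exact repU_len_lt l h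

def safe_sector_name_py (s : String) : String :=
  let s1 := PySem.Chars.lower (PySem.Chars.strip s.toList)
  let s2 := PySem.Chars.replace s1 ['&'] ['a','n','d']
  let s3 := [['/'], ['\\'], [' '], ['-'], [':'], [','], ['.']].foldl
    (fun t ch => PySem.Chars.replace t ch ['_']) s2
  let s4 := collapseLoop s3
  String.ofList (PySem.Chars.stripChars s4 ['_'])

-- ===== PORT B =====
def safe_sector_name_py_alt (s : String) : String :=
  let s1 := PySem.Chars.lower (PySem.Chars.strip s.toList)
  let s2 := PySem.Chars.replace s1 ['&'] ['a','n','d']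
  let seps : List Char := ['/', '\\', ' ', '-', ':', ',', '.', '_']
  let out := s2.foldl
    (fun out c =>
      if seps.contains c then
        (if out.getLast? == some '_' then out else out ++ ['_'])
      else out ++ [c]) []
  String.ofList (PySem.Chars.stripChars out ['_'])

-- ===== PRECONDITION & SPEC =====
def Spec_safe_sector_name_py (s : String) (out : String) : Prop := out = safe_sector_name_py_alt s
instance (s : String) (out : String) : Decidable (Spec_safe_sector_name_py s out) := by unfold Spec_safe_sector_name_py; infer_instance

-- ===== CLAIM (what is proved, stated in full; the proofs are below) =====
def Claim_equal_safe_sector_name_py : Prop := ∀ (s : String), Dom_safe_sector_name_py s → Spec_safe_sector_name_py s (safe_sector_name_py s)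

-- ===== LEMMAS AND PROOFS =====

-- the map each of A's seven single-char replaces composes to
def substA (c : Char) : Char := if ['/', '\\', ' ', '-', ':', ',', '.'].contains c then '_' else c

-- the underscore-squeezing scan, on the already substituted characters
def SZ : Bool → List Char → List Char
  | _, [] => []
  | p, c :: t => if c = '_' then (if p then SZ true t else '_' :: SZ true t) else c :: SZ false t

lemma go_single (a b : Char) (fuel : Nat) : ∀ (l acc : List Char), l.length ≤ fuel →
    PySem.Chars.replace.go [a] [b] fuel l acc
      = acc.reverse ++ l.map (fun c => if c = a then b else c) := by
  induction fuel with
  | zero => intro l acc h; cases l with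
    | nil => simp [PySem.Chars.replace.go]
    | cons c t => simp at h
  | succ n ih =>
    intro l acc h
    match l with
    | [] => simp [PySem.Chars.replace.go]
    | c :: t =>
      rw [PySem.Chars.replace.go]
      by_cases hc : c = a
      · subst hc
        have hpre : List.isPrefixOf [c] (c :: t) = true := by simp [List.isPrefixOf]
        simp only [hpre, if_true, List.length_cons, List.length_nil, List.drop_succ_cons,
          List.drop_zero, List.reverse_cons, List.reverse_nil, List.nil_append,
          List.singleton_append]
        rw [ih t (b :: acc) (by simp at h ⊢; omega)]
        simp
      · have hpre : List.isPrefixOf [a] (c :: t) = false := by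
          simp [List.isPrefixOf]; exact fun hh => hc hh.symm
        simp only [hpre, Bool.false_eq_true, if_false]
        rw [ih t (c :: acc) (by simp at h ⊢; omega)]
        simp [hc]

lemma replace_single (l : List Char) (a b : Char) :
    PySem.Chars.replace l [a] [b] = l.map (fun c => if c = a then b else c) := by
  rw [PySem.Chars.replace]
  simp only [List.isEmpty_cons, Bool.false_eq_true, if_false]
  exact go_single a b l.length l [] le_rfl

set_option maxHeartbeats 2000000 in
lemma fold7_eq (l : List Char) :
    [['/'], ['\\'], [' '], ['-'], [':'], [','], ['.']].foldl
      (fun t ch => PySem.Chars.replace t ch ['_']) l = l.map substA := by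
  simp only [List.foldl_cons, List.foldl_nil]
  rw [replace_single]; rw [replace_single]; rw [replace_single]; rw [replace_single]
  rw [replace_single]; rw [replace_single]; rw [replace_single]
  simp only [List.map_map]
  apply List.map_congr_left
  intro c _
  simp only [Function.comp_apply]
  rcases eq_or_ne c '/' with h1 | h1
  · subst h1; decide
  rcases eq_or_ne c '\\' with h2 | h2
  · subst h2; decide
  rcases eq_or_ne c ' ' with h3 | h3
  · subst h3; decide
  rcases eq_or_ne c '-' with h4 | h4
  · subst h4; decide
  rcases eq_or_ne c ':' with h5 | h5
  · subst h5; decide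
  rcases eq_or_ne c ',' with h6 | h6
  · subst h6; decide
  rcases eq_or_ne c '.' with h7 | h7
  · subst h7; decide
  rw [if_neg h1, if_neg h2, if_neg h3, if_neg h4, if_neg h5, if_neg h6, if_neg h7]
  have hm : ¬ ((['/', '\\', ' ', '-', ':', ',', '.'] : List Char).contains c = true) := by
    simp only [List.contains_eq_mem, decide_eq_true_eq, List.mem_cons, List.not_mem_nil]
    tauto
  simp only [substA, if_neg hm]

lemma SZ_repU (l : List Char) : ∀ p, SZ p (repU l) = SZ p l := by
  induction l using repU.induct with
  | case1 => intro p; simp [repU]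
  | case2 c => intro p; simp [repU]
  | case3 a b t hab ih =>
    intro p
    obtain ⟨ha, hb⟩ := hab; subst ha hb
    by_cases hp : p <;> simp [repU, SZ, hp, ih]
  | case4 a b t hab ih =>
    intro p
    by_cases ha : a = '_'
    · have hb : b ≠ '_' := fun hb => hab ⟨ha, hb⟩
      by_cases hp : p <;> simp [repU, SZ, ha, hb, hp, ih]
    · by_cases hp : p <;> simp [repU, SZ, ha, hp, ih]

lemma SZ_of_no_dd (l : List Char) (h : ¬ (['_','_'] <:+: l)) :
    SZ false l = l ∧ (l.head? ≠ some '_' → SZ true l = l) := by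
  induction l with
  | nil => simp [SZ]
  | cons c t ih =>
    have hnp : ¬ (['_','_'] <+: c :: t) := fun hp => h (hp.isInfix)
    have hni : ¬ (['_','_'] <:+: t) := fun hi => h (List.infix_cons_iff.mpr (Or.inr hi))
    obtain ⟨ih1, ih2⟩ := ih hni
    by_cases hc : c = '_'
    · subst hc
      have hhd : t.head? ≠ some '_' := by
        intro hhd
        apply hnp
        cases t with
        | nil => simp at hhd
        | cons d t' =>
          simp at hhd; subst hhd
          exact List.cons_prefix_cons.mpr ⟨rfl, List.cons_prefix_cons.mpr ⟨rfl, List.nil_prefix⟩⟩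
      refine ⟨?_, ?_⟩
      · simp [SZ, ih2 hhd]
      · intro hh; simp at hh
    · refine ⟨?_, fun _ => ?_⟩ <;> simp [SZ, hc, ih1]

lemma collapseLoop_eq_SZ (l : List Char) : collapseLoop l = SZ false l := by
  induction l using collapseLoop.induct with
  | case1 l h ih =>
    rw [collapseLoop, dif_pos h, ih, replace_pair, SZ_repU]
  | case2 l h =>
    rw [collapseLoop, dif_neg h]
    have hni : ¬ (['_','_'] <:+: l) := by
      rw [← PySem.Chars.isIn_iff_infix]; simpa using h
    exact ((SZ_of_no_dd l hni).1).symm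

lemma contains8_iff (c : Char) :
    (['/', '\\', ' ', '-', ':', ',', '.', '_'] : List Char).contains c = true ↔ substA c = '_' := by
  simp only [substA, List.contains]
  split_ifs with h <;> simp_all
  tauto

lemma foldB_inv (l : List Char) : ∀ (acc : List Char),
    l.foldl (fun out c =>
      if (['/', '\\', ' ', '-', ':', ',', '.', '_'] : List Char).contains c then
        (if out.getLast? == some '_' then out else out ++ ['_'])
      else out ++ [c]) acc
    = acc ++ SZ (acc.getLast? == some '_') (l.map substA) := by
  induction l with
  | nil => intro acc; simp [SZ]
  | cons c t ih =>
    intro acc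
    simp only [List.foldl_cons, List.map_cons]
    by_cases hs : (['/', '\\', ' ', '-', ':', ',', '.', '_'] : List Char).contains c = true
    · have hsub : substA c = '_' := (contains8_iff c).mp hs
      rw [if_pos hs]
      by_cases hl : acc.getLast? == some '_'
      · rw [if_pos hl, ih acc, hsub, hl]
        simp [SZ]
      · rw [if_neg hl, ih (acc ++ ['_'])]
        have h1 : (acc ++ ['_']).getLast? = some '_' := by simp
        have hl' : (acc.getLast? == some '_') = false := by simpa using hl
        rw [h1, hsub, hl']
        simp [SZ]
    · have h7 : (['/', '\\', ' ', '-', ':', ',', '.'] : List Char).contains c ≠ true := by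
        intro h7
        apply hs
        simp only [List.contains_eq_mem, decide_eq_true_eq, List.mem_cons, List.not_mem_nil] at h7 ⊢
        tauto
      have hsub : substA c = c := by simp only [substA, if_neg h7]
      have hc : c ≠ '_' := by
        intro hc; subst hc; exact hs (by decide)
      have h1 : (acc ++ [c]).getLast? = some c := by simp
      rw [if_neg hs, ih (acc ++ [c]), h1, hsub]
      have hb : (some c == some '_') = false := by simpa using hc
      rw [hb]
      simp [SZ, hc]

-- ===== VERDICT (by name: the statement is the Claim_ definition above) =====
theorem safe_sector_name_py_spec : Claim_equal_safe_sector_name_py := by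
  intro s _
  unfold Spec_safe_sector_name_py safe_sector_name_py safe_sector_name_py_alt
  simp only []
  rw [fold7_eq, collapseLoop_eq_SZ, foldB_inv]
  simp
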